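-- pv_equiv track=rewrite | github.com/Valuedx/AEAIHubOrchestrator | backend/app/engine/model_registry.py | default_llm_for
-- ===== SOURCE A (Python) =====
-- from typing import Iterable, Literal
--
-- ModelRole = Literal["fast", "balanced", "powerful", "copilot"]
--
-- LLM_TIER_DEFAULTS: dict[ModelRole, dict[str, str]] = {
--     "fast": {
--         "google": "gemini-3-flash-preview",
--         "vertex": "gemini-3-flash-preview",
--         "anthropic": "claude-3-5-haiku-20241022",
--         "openai": "gpt-4o-mini",
--     },
--     "balanced": {
--         "google": "gemini-2.5-pro",
--         "vertex": "gemini-2.5-pro",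
--         "anthropic": "claude-sonnet-4-20250514",
--         "openai": "gpt-4o",
--     },
--     "powerful": {
--         "google": "gemini-3.1-pro-preview",
--         "vertex": "gemini-3.1-pro-preview",
--         "anthropic": "claude-sonnet-4-20250514",
--         "openai": "gpt-4o",
--     },
--     "copilot": {
--         "google": "gemini-3-flash-preview",
--         "vertex": "gemini-3-flash-preview",
--         "anthropic": "claude-sonnet-4-6",
--     },
-- }
--
-- class UnknownModelError(ValueError):
--     """Raised when a (provider, model_id) pair isn't in the registry."""
--
-- def default_llm_for(provider: str, role: ModelRole = "balanced") -> str: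
--     """Resolve a (provider, role) pair to a concrete model ID.
--
--     Falls back across roles if a specific role isn't wired for a provider:
--     copilot → powerful → balanced → fast. Raises if no default exists at all.
--     """
--     fallback_order: list[ModelRole] = [role]
--     for r in ("copilot", "powerful", "balanced", "fast"):
--         if r != role and r not in fallback_order:
--             fallback_order.append(r)  # type: ignore[arg-type]
--     for r in fallback_order:
--         mapping = LLM_TIER_DEFAULTS.get(r, {})
--         if provider in mapping:
--             return mapping[provider]
--     raise UnknownModelError(
--         f"No default model for provider={provider!r} (role={role!r})"
--     )
-- ===== SOURCE B (Python) =====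
-- LLM_TIER_DEFAULTS = {
--     "fast": {
--         "google": "gemini-3-flash-preview",
--         "vertex": "gemini-3-flash-preview",
--         "anthropic": "claude-3-5-haiku-20241022",
--         "openai": "gpt-4o-mini",
--     },
--     "balanced": {
--         "google": "gemini-2.5-pro",
--         "vertex": "gemini-2.5-pro",
--         "anthropic": "claude-sonnet-4-20250514",
--         "openai": "gpt-4o",
--     },
--     "powerful": {
--         "google": "gemini-3.1-pro-preview",
--         "vertex": "gemini-3.1-pro-preview",
--         "anthropic": "claude-sonnet-4-20250514",
--         "openai": "gpt-4o",
--     },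
--     "copilot": {
--         "google": "gemini-3-flash-preview",
--         "vertex": "gemini-3-flash-preview",
--         "anthropic": "claude-sonnet-4-6",
--     },
-- }
--
-- class UnknownModelError(ValueError):
--     """Raised when a (provider, model_id) pair isn't in the registry."""
--
-- def default_llm_for(provider, role="balanced"):
--     # Build one merged table by overlaying role dicts from lowest to highest
--     # priority (role's own dict last, so it wins), then do a single lookup.
--     priority = [role] + [r for r in ("copilot", "powerful", "balanced", "fast") if r != role]
--     merged = {}
--     for r in reversed(priority):
--         merged.update(LLM_TIER_DEFAULTS.get(r, {}))
--     if provider in merged: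
--         return merged[provider]
--     raise UnknownModelError(
--         f"No default model for provider={provider!r} (role={role!r})"
--     )
-- ===== Notes on version B (the rewrite author's own statement) =====
-- stated objective: simpler
-- what changed: B replaces A's scan-and-short-circuit loop over a deduplicated fallback chain by overlaying the role dicts into one merged table in reverse priority order and doing a single lookup.
import Mathlib
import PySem

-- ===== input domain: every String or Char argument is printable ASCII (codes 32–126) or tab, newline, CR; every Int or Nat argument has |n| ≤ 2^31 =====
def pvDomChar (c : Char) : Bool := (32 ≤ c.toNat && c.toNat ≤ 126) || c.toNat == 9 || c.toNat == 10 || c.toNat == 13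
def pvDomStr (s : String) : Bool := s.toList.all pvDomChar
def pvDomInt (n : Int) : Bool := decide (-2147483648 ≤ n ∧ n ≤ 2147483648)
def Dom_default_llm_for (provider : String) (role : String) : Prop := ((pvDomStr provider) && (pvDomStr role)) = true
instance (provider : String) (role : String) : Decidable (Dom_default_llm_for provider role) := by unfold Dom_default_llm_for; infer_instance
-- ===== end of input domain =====

-- B builds one merged provider→model table by overlaying the role dicts in reverse
-- priority order and does a single lookup, instead of A's scan-and-short-circuit loop
-- over the fallback chain (objective: simpler).

-- module constant LLM_TIER_DEFAULTS (shared data of both programs)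
def LLM_TIER_DEFAULTS : PySem.Dict String (PySem.Dict String String) :=
  PySem.Dict.mk
    [ ("fast", PySem.Dict.mk
        [ ("google", "gemini-3-flash-preview"),
          ("vertex", "gemini-3-flash-preview"),
          ("anthropic", "claude-3-5-haiku-20241022"),
          ("openai", "gpt-4o-mini") ]),
      ("balanced", PySem.Dict.mk
        [ ("google", "gemini-2.5-pro"),
          ("vertex", "gemini-2.5-pro"),
          ("anthropic", "claude-sonnet-4-20250514"),
          ("openai", "gpt-4o") ]),
      ("powerful", PySem.Dict.mk
        [ ("google", "gemini-3.1-pro-preview"),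
          ("vertex", "gemini-3.1-pro-preview"),
          ("anthropic", "claude-sonnet-4-20250514"),
          ("openai", "gpt-4o") ]),
      ("copilot", PySem.Dict.mk
        [ ("google", "gemini-3-flash-preview"),
          ("vertex", "gemini-3-flash-preview"),
          ("anthropic", "claude-sonnet-4-6") ]) ]

-- ===== PORT A =====
-- A's second loop: first role in the chain whose mapping contains provider; none = the raise.
def pvResolveChain (provider : String) : List String → Option String
  | [] => none
  | r :: rs =>
      let mapping := (LLM_TIER_DEFAULTS.get? r).getD PySem.Dict.empty
      if mapping.contains provider then mapping.get? provider
      else pvResolveChain provider rs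

def default_llm_for (provider : String) (role : String) : String :=
  let fallback_order : List String :=
    (["copilot", "powerful", "balanced", "fast"] : List String).foldl
      (fun acc r => if r ≠ role ∧ r ∉ acc then acc ++ [r] else acc) [role]
  -- Python raises UnknownModelError where pvResolveChain is none; Pre_ excludes those inputs.
  (pvResolveChain provider fallback_order).getD ""

-- ===== PORT B =====
def default_llm_for_alt (provider : String) (role : String) : String :=
  let priority : List String :=
    role :: (["copilot", "powerful", "balanced", "fast"] : List String).filter (fun r => r ≠ role)
  let merged : PySem.Dict String String :=
    priority.reverse.foldl
      (fun acc r => acc.update ((LLM_TIER_DEFAULTS.get? r).getD PySem.Dict.empty).items)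
      PySem.Dict.empty
  -- Python raises UnknownModelError when provider is not in merged; Pre_ excludes those inputs.
  match merged.get? provider with
  | some v => v
  | none => ""

-- ===== PRECONDITION & SPEC =====
-- Pre_ excludes exactly the inputs on which A raises UnknownModelError:
-- providers outside the registry (every role dict has keys among these four).
def Pre_default_llm_for (provider : String) (role : String) : Prop :=
  provider = "google" ∨ provider = "vertex" ∨ provider = "anthropic" ∨ provider = "openai"
instance (provider : String) (role : String) : Decidable (Pre_default_llm_for provider role) := by
  unfold Pre_default_llm_for; infer_instance

def pvWitness_default_llm_for : String × String := ("openai", "copilot")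

def Spec_default_llm_for (provider : String) (role : String) (out : String) : Prop := out = default_llm_for_alt provider role
instance (provider : String) (role : String) (out : String) : Decidable (Spec_default_llm_for provider role out) := by unfold Spec_default_llm_for; infer_instance

-- ===== CLAIM (what is proved, stated in full; the proofs are below) =====
def Claim_equal_default_llm_for : Prop := ∀ (provider : String) (role : String), Dom_default_llm_for provider role → Pre_default_llm_for provider role → Spec_default_llm_for provider role (default_llm_for provider role)

-- ===== LEMMAS AND PROOFS =====

-- When role is none of the four tier names, A's chain is role::tiers with role's
-- mapping empty, and B keeps all four tiers in the filter: both equal their value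
-- at the non-tier role "other".
lemma pv_other_A (provider role : String)
    (h1 : role ≠ "copilot") (h2 : role ≠ "powerful") (h3 : role ≠ "balanced") (h4 : role ≠ "fast") :
    default_llm_for provider role = default_llm_for provider "other" := by
  simp [default_llm_for, pvResolveChain, LLM_TIER_DEFAULTS,
    Ne.symm h1, Ne.symm h2, Ne.symm h3, Ne.symm h4, PySem.Dict.get?, List.foldl]

lemma pv_other_B (provider role : String)
    (h1 : role ≠ "copilot") (h2 : role ≠ "powerful") (h3 : role ≠ "balanced") (h4 : role ≠ "fast") :
    default_llm_for_alt provider role = default_llm_for_alt provider "other" := by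
  simp [default_llm_for_alt, LLM_TIER_DEFAULTS,
    Ne.symm h1, Ne.symm h2, Ne.symm h3, Ne.symm h4, PySem.Dict.get?,
    PySem.Dict.update, List.filter, List.foldl]

-- ===== VERDICT (by name: the statement is the Claim_ definition above) =====
theorem default_llm_for_spec : Claim_equal_default_llm_for := by
  intro provider role _ hpre
  unfold Spec_default_llm_for
  by_cases h1 : role = "copilot"
  · subst h1; rcases hpre with h | h | h | h <;> subst h <;> decide
  by_cases h2 : role = "powerful"
  · subst h2; rcases hpre with h | h | h | h <;> subst h <;> decide
  by_cases h3 : role = "balanced"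
  · subst h3; rcases hpre with h | h | h | h <;> subst h <;> decide
  by_cases h4 : role = "fast"
  · subst h4; rcases hpre with h | h | h | h <;> subst h <;> decide
  · rw [pv_other_A provider role h1 h2 h3 h4, pv_other_B provider role h1 h2 h3 h4]
    rcases hpre with h | h | h | h <;> subst h <;> decide
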